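-- pv_equiv track=rewrite | github.com/aurlro/FinancePerso | modules/update/changelog.py | _insert_entry
-- ===== SOURCE A (Python) =====
-- def _insert_entry(content: str, entry_md: str) -> str:
--     """Insert entry into existing changelog.
--
--     Args:
--         content: Existing changelog content
--         entry_md: Entry to insert
--
--     Returns:
--         Updated content
--     """
--     lines = content.split("\n")
--     insert_idx = 0
--
--     # Find first version entry or end of header
--     for i, line in enumerate(lines):
--         if line.startswith("## ["):
--             insert_idx = i
--             break
--         if line.startswith("#"):
--             insert_idx = i + 1
--
--     # Insert entry
--     new_lines = lines[:insert_idx] + ["", entry_md] + lines[insert_idx:]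
--     return "\n".join(new_lines)
-- ===== SOURCE B (Python) =====
-- def _insert_entry(content: str, entry_md: str) -> str:
--     """Insert entry into existing changelog (different decomposition: direct index computation)."""
--     lines = content.split("\n")
--     idx = next((i for i, l in enumerate(lines) if l.startswith("## [")), None)
--     if idx is None:
--         idx = next((len(lines) - j for j, l in enumerate(reversed(lines)) if l.startswith("#")), 0)
--     lines[idx:idx] = ["", entry_md]
--     return "\n".join(lines)
-- ===== Notes on version B (the rewrite author's own statement) =====
-- stated objective: simpler
-- what changed: Replaces A's single stateful scan (running insert_idx with break) by direct index computation: the first '## [' line index if any, otherwise one past the last '#' line found by scanning the reversed list, then one splice.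
import Mathlib
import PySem

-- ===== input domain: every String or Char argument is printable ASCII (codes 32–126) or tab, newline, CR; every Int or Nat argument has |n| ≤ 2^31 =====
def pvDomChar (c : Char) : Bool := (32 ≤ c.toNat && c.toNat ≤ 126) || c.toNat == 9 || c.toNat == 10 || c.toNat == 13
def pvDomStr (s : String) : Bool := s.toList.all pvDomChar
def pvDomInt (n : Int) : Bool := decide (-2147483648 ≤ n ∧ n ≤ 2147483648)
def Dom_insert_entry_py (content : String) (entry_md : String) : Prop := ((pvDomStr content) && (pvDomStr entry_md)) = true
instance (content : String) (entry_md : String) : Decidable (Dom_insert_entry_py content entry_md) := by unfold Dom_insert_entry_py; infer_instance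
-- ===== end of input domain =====

-- B computes the insertion index directly (first "## [" line, else one past the last "#" line,
-- else 0) instead of A's single stateful scan with break; objective: simpler decomposition.

-- ===== PORT A =====
-- A's for-loop over enumerate(lines) with `insert_idx` state and `break`.
def insertEntryLoop (lines : List String) (i : Nat) (insertIdx : Nat) : Nat :=
  match lines with
  | [] => insertIdx
  | line :: rest =>
    if PySem.Str.startswith line "## [" then i
    else if PySem.Str.startswith line "#" then insertEntryLoop rest (i + 1) (i + 1)
    else insertEntryLoop rest (i + 1) insertIdx

def insert_entry_py (content : String) (entry_md : String) : String :=
  let lines := (PySem.Str.split? content "\n").getD []   -- split? is none only for sep = ""; sep is "\n"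
  let insertIdx := insertEntryLoop lines 0 0
  PySem.Str.join "\n" (lines.take insertIdx ++ ["", entry_md] ++ lines.drop insertIdx)

-- ===== PORT B =====
def insert_entry_py_alt (content : String) (entry_md : String) : String :=
  let lines := (PySem.Str.split? content "\n").getD []   -- split? is none only for sep = ""; sep is "\n"
  let idx :=
    match lines.findIdx? (fun l => PySem.Str.startswith l "## [") with
    | some k => k
    | none =>
      match lines.reverse.findIdx? (fun l => PySem.Str.startswith l "#") with
      | some j => lines.length - j
      | none => 0
  PySem.Str.join "\n" (lines.take idx ++ ["", entry_md] ++ lines.drop idx)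

-- ===== PRECONDITION & SPEC =====
def Spec_insert_entry_py (content : String) (entry_md : String) (out : String) : Prop := out = insert_entry_py_alt content entry_md
instance (content : String) (entry_md : String) (out : String) : Decidable (Spec_insert_entry_py content entry_md out) := by unfold Spec_insert_entry_py; infer_instance

-- ===== CLAIM (what is proved, stated in full; the proofs are below) =====
def Claim_equal_insert_entry_py : Prop := ∀ (content : String) (entry_md : String), Dom_insert_entry_py content entry_md → Spec_insert_entry_py content entry_md (insert_entry_py content entry_md)

-- ===== LEMMAS AND PROOFS =====

lemma findIdx?_lt_length {α : Type} (p : α → Bool) (xs : List α) (j : Nat)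
    (h : xs.findIdx? p = some j) : j < xs.length := by
  have := List.findIdx?_eq_some_iff_findIdx_eq.mp h
  omega

-- A's loop computes B's index (shifted by the running counter i; acc is the fallback).
lemma insertEntryLoop_eq (ls : List String) (i acc : Nat) :
    insertEntryLoop ls i acc =
      match ls.findIdx? (fun l => PySem.Str.startswith l "## [") with
      | some k => i + k
      | none =>
        match ls.reverse.findIdx? (fun l => PySem.Str.startswith l "#") with
        | some j => i + (ls.length - j)
        | none => acc := by
  induction ls generalizing i acc with
  | nil => simp [insertEntryLoop]
  | cons l rest ih =>
    simp only [insertEntryLoop, List.findIdx?_cons, List.reverse_cons, List.findIdx?_append,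
      List.findIdx?_nil, List.length_cons]
    cases hv : PySem.Str.startswith l "## [" with
    | true => simp
    | false =>
      cases hh : PySem.Str.startswith l "#" with
      | true =>
        simp only [reduceIte]
        rw [ih]
        cases hV : rest.findIdx? (fun l => PySem.Str.startswith l "## [") with
        | some k => simp; ring
        | none =>
          cases hH : rest.reverse.findIdx? (fun l => PySem.Str.startswith l "#") with
          | some j =>
            have hj : j < rest.length := by
              have := findIdx?_lt_length _ _ _ hH; simpa using this
            simp only [Option.map_none, Option.or]
            simp
            rw [Nat.sub_add_comm (Nat.le_of_lt hj)]
            ring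
          | none => simp
      | false =>
        simp only [Bool.false_eq_true, if_false, Option.map_none, Option.or_none]
        rw [ih]
        cases hV : rest.findIdx? (fun l => PySem.Str.startswith l "## [") with
        | some k => simp; ring
        | none =>
          cases hH : rest.reverse.findIdx? (fun l => PySem.Str.startswith l "#") with
          | some j =>
            have hj : j < rest.length := by
              have := findIdx?_lt_length _ _ _ hH; simpa using this
            simp only [Option.map_none]
            rw [Nat.sub_add_comm (Nat.le_of_lt hj)]
            ring
          | none => simp

lemma idx_eq (ls : List String) :
    insertEntryLoop ls 0 0 =
      match ls.findIdx? (fun l => PySem.Str.startswith l "## [") with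
      | some k => k
      | none =>
        match ls.reverse.findIdx? (fun l => PySem.Str.startswith l "#") with
        | some j => ls.length - j
        | none => 0 := by
  rw [insertEntryLoop_eq]
  cases hV : ls.findIdx? (fun l => PySem.Str.startswith l "## [") with
  | some k => simp
  | none =>
    cases hH : ls.reverse.findIdx? (fun l => PySem.Str.startswith l "#") <;> simp

-- ===== VERDICT (by name: the statement is the Claim_ definition above) =====
theorem insert_entry_py_spec : Claim_equal_insert_entry_py := by
  intro content entry_md _
  unfold Spec_insert_entry_py
  simp only [insert_entry_py, insert_entry_py_alt, idx_eq]
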